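-- pv_equiv track=rewrite | github.com/jerrygaoLondon/oke-extractor | oke/oak/FeatureFactory.py | dictionary_tagging
-- ===== SOURCE A (Python) =====
-- def dictionary_tagging(tokens, _dict):
--     '''
--     sequentially tag tokens with the given dictionary (multiple tuple list)
--     '''
--     #initialise
--     #sem_tagged_tokens=[(token,None) for token in tokens]
--     token_sem_index={}
--     max_token_len=len(tokens)
--     for dict_tuple in _dict:
--         dict_name=dict_tuple[0]
--         dict_name_tag=dict_tuple[1]
--         dict_name_tokens=dict_name.split(' ')
--         name_len=len(dict_name_tokens)
--         for i in range(0,max_token_len):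
--             beginIndex=i
--             endIndex=i+name_len
--
--             if(endIndex>max_token_len):
--                 break
--
--             if (tokens[beginIndex:endIndex] == dict_name_tokens):
--                 token_sem_index.update({index:dict_name_tag for index in range(beginIndex,endIndex)})
--             i+=1
--
--     sem_tagged_tokens=[(tokens[i],None if i not in token_sem_index else token_sem_index[i]) for i in range(0, max_token_len)]
--     return sem_tagged_tokens
-- ===== SOURCE B (Python) =====
-- def dictionary_tagging(tokens, _dict):
--     '''
--     sequentially tag tokens with the given dictionary (multiple tuple list)
--     '''
--     n = len(tokens)
--     # index token positions by token value: only positions whose token equals a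
--     # phrase's first word are candidate match starts
--     first_index = {}
--     for i in range(n):
--         first_index.setdefault(tokens[i], []).append(i)
--     tags = [None] * n
--     for name, tag in _dict:
--         parts = name.split(' ')
--         L = len(parts)
--         for i in first_index.get(parts[0], []):
--             if i + L <= n and tokens[i:i+L] == parts:
--                 for j in range(i, i + L):
--                     tags[j] = tag
--     return list(zip(tokens, tags))
-- ===== Notes on version B (the rewrite author's own statement) =====
-- stated objective: faster
-- what changed: Instead of scanning every start position for every dictionary phrase, B builds a positions-by-token index once and only tests candidate starts whose token equals the phrase's first word, writing tags into a mutable array (dict-order overwrites preserved).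
import Mathlib
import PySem

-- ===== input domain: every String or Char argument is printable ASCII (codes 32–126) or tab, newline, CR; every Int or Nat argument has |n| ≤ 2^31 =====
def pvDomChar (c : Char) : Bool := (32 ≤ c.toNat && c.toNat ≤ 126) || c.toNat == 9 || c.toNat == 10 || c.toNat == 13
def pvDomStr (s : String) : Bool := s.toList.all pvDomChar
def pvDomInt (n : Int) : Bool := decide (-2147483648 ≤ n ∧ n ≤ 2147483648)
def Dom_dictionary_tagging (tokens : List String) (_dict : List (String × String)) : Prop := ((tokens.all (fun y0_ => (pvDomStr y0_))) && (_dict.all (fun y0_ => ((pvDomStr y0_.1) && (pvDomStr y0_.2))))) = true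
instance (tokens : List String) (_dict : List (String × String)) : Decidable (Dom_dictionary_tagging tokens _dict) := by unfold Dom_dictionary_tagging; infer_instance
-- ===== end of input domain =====

-- B replaces A's scan of every start position for every phrase by a positions-by-token
-- index built once, so only candidate starts whose token equals the phrase's first word
-- are tested (objective: faster; same return value).

-- ===== PORT A =====
-- inner 'for i in range(0, max_token_len)' loop with its break, one dictionary entry;
-- the dict's int keys are the token indices 0..n-1, hence Nat here
def dtA_inner (tokens : List String) (n L : Nat) (parts : List String) (tag : String)
    (is : List Nat) (idx : PySem.Dict Nat String) : PySem.Dict Nat String :=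
  match is with
  | [] => idx
  | i :: rest =>
      if i + L > n then idx  -- break
      else
        dtA_inner tokens n L parts tag rest
          (if PySem.List.slice tokens (some (i : Int)) (some ((i : Int) + (L : Int))) = parts then
            -- token_sem_index.update({index: tag for index in range(beginIndex, endIndex)})
            (List.range' i L).foldl (fun d j => d.insert j tag) idx
          else idx)

def dictionary_tagging (tokens : List String) (_dict : List (String × String)) : List (String × Option String) :=
  let n := tokens.length
  let idx := _dict.foldl (fun idx tup =>
      let parts := (PySem.Str.split? tup.1 " ").getD []   -- sep " " ≠ "": split? is some
      dtA_inner tokens n parts.length parts tup.2 (List.range n) idx) PySem.Dict.empty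
  (List.range n).map (fun (i : Nat) =>
    (PySem.List.pyGetD tokens (i : Int) "",
     if idx.contains i then idx.get? i else none))   -- None if i not in index else index[i]

-- ===== PORT B =====
-- first_index: token value -> list of its positions (setdefault(...).append(i))
def dtB_index (tokens : List String) (n : Nat) : PySem.Dict String (List Nat) :=
  (List.range n).foldl
    (fun d (i : Nat) => d.modify (PySem.List.pyGetD tokens (i : Int) "") [] (· ++ [i]))
    PySem.Dict.empty

-- one dictionary entry: test only the candidate starts indexed under the first word
def dtB_entry (tokens : List String) (n : Nat) (fidx : PySem.Dict String (List Nat))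
    (tags : List (Option String)) (tup : String × String) : List (Option String) :=
  let parts := (PySem.Str.split? tup.1 " ").getD []
  let L := parts.length
  (fidx.getD (parts.headD "") []).foldl   -- parts[0]; split never returns []
    (fun ts (i : Nat) =>
      if i + L ≤ n ∧ PySem.List.slice tokens (some (i : Int)) (some ((i : Int) + (L : Int))) = parts then
        (List.range' i L).foldl (fun ts j => ts.set j (some tup.2)) ts  -- tags[j] = tag
      else ts) tags

def dictionary_tagging_alt (tokens : List String) (_dict : List (String × String)) : List (String × Option String) :=
  let n := tokens.length
  let fidx := dtB_index tokens n
  let tags := _dict.foldl (dtB_entry tokens n fidx) (List.replicate n none)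
  tokens.zip tags

-- ===== PRECONDITION & SPEC =====
def Spec_dictionary_tagging (tokens : List String) (_dict : List (String × String)) (out : List (String × Option String)) : Prop := out = dictionary_tagging_alt tokens _dict
instance (tokens : List String) (_dict : List (String × String)) (out : List (String × Option String)) : Decidable (Spec_dictionary_tagging tokens _dict out) := by unfold Spec_dictionary_tagging; infer_instance

-- ===== CLAIM (what is proved, stated in full; the proofs are below) =====
def Claim_equal_dictionary_tagging : Prop := ∀ (tokens : List String) (_dict : List (String × String)), Dom_dictionary_tagging tokens _dict → Spec_dictionary_tagging tokens _dict (dictionary_tagging tokens _dict)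

-- ===== LEMMAS AND PROOFS =====

-- 'start position i is a match of this entry covering token j'
def dtHits (tokens : List String) (n L : Nat) (parts : List String) (j i : Nat) : Bool :=
  decide (i + L ≤ n) &&
  decide (PySem.List.slice tokens (some (i : Int)) (some ((i : Int) + (L : Int))) = parts) &&
  decide (i ≤ j ∧ j < i + L)

theorem insRange_get? (L : Nat) : ∀ (i : Nat) (d : PySem.Dict Nat String) (tag : String) (j : Nat),
    ((List.range' i L).foldl (fun d k => d.insert k tag) d).get? j
      = if i ≤ j ∧ j < i + L then some tag else d.get? j := by
  induction L with
  | zero =>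
      intro i d tag j
      rw [List.range'_zero, List.foldl_nil, if_neg (by omega)]
  | succ L ih =>
      intro i d tag j
      rw [List.range'_succ, List.foldl_cons, ih, PySem.Dict.get?_insert]
      by_cases h1 : i + 1 ≤ j ∧ j < i + 1 + L
      · rw [if_pos h1, if_pos (by omega)]
      · rw [if_neg h1]
        by_cases h2 : j = i
        · rw [if_pos h2, if_pos (by omega)]
        · rw [if_neg h2, if_neg (by omega)]

theorem setRange_length (L : Nat) : ∀ (i : Nat) (ts : List (Option String)) (v : Option String),
    ((List.range' i L).foldl (fun ts j => ts.set j v) ts).length = ts.length := by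
  induction L with
  | zero => intro i ts v; rfl
  | succ L ih => intro i ts v; rw [List.range'_succ, List.foldl_cons, ih]; simp

theorem setRange_getElem? (L : Nat) : ∀ (i : Nat) (ts : List (Option String)) (v : Option String)
    (j : Nat), i + L ≤ ts.length →
    ((List.range' i L).foldl (fun ts j => ts.set j v) ts)[j]?
      = if i ≤ j ∧ j < i + L then some v else ts[j]? := by
  induction L with
  | zero =>
      intro i ts v j _
      rw [List.range'_zero, List.foldl_nil, if_neg (by omega)]
  | succ L ih =>
      intro i ts v j h
      rw [List.range'_succ, List.foldl_cons,
          ih (i+1) _ v j (by simp; omega), List.getElem?_set]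
      by_cases h1 : i + 1 ≤ j ∧ j < i + 1 + L
      · rw [if_pos h1, if_pos (by omega)]
      · rw [if_neg h1]
        by_cases h2 : i = j
        · rw [if_pos h2, if_pos (by omega), if_pos (by omega)]
        · rw [if_neg h2, if_neg (by omega)]

theorem dtA_inner_get? (tokens : List String) (n L : Nat) (parts : List String) (tag : String) :
    ∀ (is : List Nat), is.Pairwise (· ≤ ·) → ∀ (idx : PySem.Dict Nat String) (j : Nat),
    (dtA_inner tokens n L parts tag is idx).get? j
      = if is.any (dtHits tokens n L parts j) then some tag else idx.get? j := by
  intro is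
  induction is with
  | nil => intro _ idx j; simp [dtA_inner]
  | cons i rest ih =>
      intro hp idx j
      have hle : ∀ b ∈ rest, i ≤ b := (List.pairwise_cons.mp hp).1
      have hrest := (List.pairwise_cons.mp hp).2
      rw [dtA_inner]
      by_cases hbrk : i + L > n
      · -- break: no index in i :: rest can hit
        rw [if_pos hbrk]
        have hall : (i :: rest).any (dtHits tokens n L parts j) = false := by
          rw [List.any_eq_false]
          intro b hb
          have hbn : ¬ (b + L ≤ n) := by
            rcases List.mem_cons.mp hb with rfl | hb'
            · omega
            · have := hle b hb'; omega
          simp [dtHits, hbn]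
        rw [hall]; simp
      · rw [if_neg hbrk, ih hrest _ j]
        by_cases hany : rest.any (dtHits tokens n L parts j) = true
        · simp [hany]
        · simp only [Bool.not_eq_true] at hany
          simp only [hany, List.any_cons, Bool.or_false]
          by_cases hm : PySem.List.slice tokens (some (i : Int)) (some ((i : Int) + (L : Int))) = parts
          · rw [if_pos hm, insRange_get?]
            by_cases hc : i ≤ j ∧ j < i + L <;>
              simp [dtHits, hm, hc, Nat.not_lt.mpr (Nat.le_of_not_lt hbrk)]
          · rw [if_neg hm]
            simp [dtHits, hm]

theorem dtB_fold_length (tokens : List String) (n : Nat) (parts : List String) (tag : String) :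
    ∀ (is : List Nat) (ts : List (Option String)),
    (is.foldl (fun ts (i : Nat) =>
        if i + parts.length ≤ n ∧
            PySem.List.slice tokens (some (i : Int)) (some ((i : Int) + (parts.length : Int))) = parts then
          (List.range' i parts.length).foldl (fun ts j => ts.set j (some tag)) ts
        else ts) ts).length = ts.length := by
  intro is
  induction is with
  | nil => intro ts; rfl
  | cons i rest ih =>
      intro ts
      rw [List.foldl_cons, ih]
      split
      · rw [setRange_length]
      · rfl

theorem dtB_fold_getElem? (tokens : List String) (n : Nat) (parts : List String) (tag : String) :
    ∀ (is : List Nat) (ts : List (Option String)), ts.length = n → ∀ (j : Nat),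
    (is.foldl (fun ts (i : Nat) =>
        if i + parts.length ≤ n ∧
            PySem.List.slice tokens (some (i : Int)) (some ((i : Int) + (parts.length : Int))) = parts then
          (List.range' i parts.length).foldl (fun ts j => ts.set j (some tag)) ts
        else ts) ts)[j]?
      = if is.any (dtHits tokens n parts.length parts j) then some (some tag) else ts[j]? := by
  intro is
  induction is with
  | nil => intro ts _ j; simp
  | cons i rest ih =>
      intro ts hlen j
      rw [List.foldl_cons, List.any_cons]
      by_cases hg : i + parts.length ≤ n ∧
          PySem.List.slice tokens (some (i : Int)) (some ((i : Int) + (parts.length : Int))) = parts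
      · rw [if_pos hg,
            ih _ (by rw [setRange_length]; exact hlen) j,
            setRange_getElem? parts.length i ts (some tag) j (by omega)]
        by_cases hany : rest.any (dtHits tokens n parts.length parts j) = true
        · simp [hany]
        · simp only [Bool.not_eq_true] at hany
          by_cases hc : i ≤ j ∧ j < i + parts.length <;>
            simp [hany, dtHits, hg.1, hg.2, hc]
      · rw [if_neg hg, ih _ hlen j]
        have hh : dtHits tokens n parts.length parts j i = false := by
          simp only [dtHits]
          rcases Decidable.not_and_iff_not_or_not.mp hg with h | h <;> simp [h]
        rw [hh]; simp

theorem dtB_index_getD (tokens : List String) (n : Nat) (key : String) :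
    (dtB_index tokens n).getD key []
      = (List.range n).filter (fun (i : Nat) => PySem.List.pyGetD tokens (i : Int) "" == key) := by
  unfold dtB_index
  have hfm : ((List.range n).foldl
        (fun d (i : Nat) => d.modify (PySem.List.pyGetD tokens (i : Int) "") [] (· ++ [i]))
        PySem.Dict.empty)
      = (((List.range n).map (fun (i : Nat) => (PySem.List.pyGetD tokens (i : Int) "", i))).foldl
        (fun d p => d.modify p.1 [] (· ++ [p.2])) PySem.Dict.empty) := by
    rw [List.foldl_map]
  rw [hfm]
  rw [PySem.Dict.getD_foldl_modify_append, List.filter_map, List.map_map]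
  simp only [Function.comp_def]
  simp

-- a hit for this entry forces the start token to equal the phrase's first word
theorem dtHits_first (tokens : List String) (n : Nat) (parts : List String) (j i : Nat)
    (h : dtHits tokens n parts.length parts j i = true) :
    (PySem.List.pyGetD tokens (i : Int) "" == parts.headD "") = true := by
  simp only [dtHits, Bool.and_eq_true, decide_eq_true_eq] at h
  obtain ⟨⟨hn, hs⟩, hc⟩ := h
  have hL : 1 ≤ parts.length := by omega
  rw [PySem.List.slice_natCast_add] at hs
  have hhead : parts.head? = tokens[i]? := by
    rw [← hs, List.head?_take, if_neg (by omega), List.head?_drop]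
  have : PySem.List.pyGetD tokens (i : Int) "" = parts.headD "" := by
    rw [PySem.List.pyGetD_natCast, List.getD_eq_getElem?_getD, List.headD_eq_head?_getD, hhead]
  simp [this]

-- scanning all starts = scanning only the candidates from the first-word index
theorem any_filter_first (tokens : List String) (n : Nat) (parts : List String) (j : Nat) :
    ((List.range n).filter
        (fun (i : Nat) => PySem.List.pyGetD tokens (i : Int) "" == parts.headD "")).any
        (dtHits tokens n parts.length parts j)
      = (List.range n).any (dtHits tokens n parts.length parts j) := by
  rw [List.any_filter]
  refine List.any_congr rfl ?_
  intro i
  by_cases h : dtHits tokens n parts.length parts j i = true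
  · rw [h, dtHits_first tokens n parts j i h]; rfl
  · simp only [Bool.not_eq_true] at h; simp [h]

-- one dictionary entry preserves the pointwise correspondence tags[j] = idx.get? j
theorem entry_step (tokens : List String) (tup : String × String)
    (idx : PySem.Dict Nat String) (tags : List (Option String))
    (hlen : tags.length = tokens.length)
    (hinv : ∀ j, j < tokens.length → tags[j]? = some (idx.get? j)) :
    (dtB_entry tokens tokens.length (dtB_index tokens tokens.length) tags tup).length = tokens.length ∧
    ∀ j, j < tokens.length →
      (dtB_entry tokens tokens.length (dtB_index tokens tokens.length) tags tup)[j]?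
        = some ((dtA_inner tokens tokens.length
            ((PySem.Str.split? tup.1 " ").getD []).length
            ((PySem.Str.split? tup.1 " ").getD []) tup.2
            (List.range tokens.length) idx).get? j) := by
  constructor
  · simp only [dtB_entry]
    rw [dtB_fold_length]; exact hlen
  · intro j hj
    simp only [dtB_entry]
    rw [dtB_fold_getElem? tokens tokens.length _ tup.2 _ tags hlen j,
        dtA_inner_get? tokens tokens.length _ _ tup.2 (List.range tokens.length)
          ((List.pairwise_lt_range).imp (fun h => Nat.le_of_lt h)) idx j,
        dtB_index_getD, any_filter_first]
    by_cases hany : (List.range tokens.length).any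
        (dtHits tokens tokens.length ((PySem.Str.split? tup.1 " ").getD []).length
          ((PySem.Str.split? tup.1 " ").getD []) j) = true
    · simp [hany]
    · simp only [Bool.not_eq_true] at hany
      simp [hany, hinv j hj]

-- the whole dictionary loop preserves it
theorem dict_fold (tokens : List String) :
    ∀ (ds : List (String × String)) (idx : PySem.Dict Nat String) (tags : List (Option String)),
    tags.length = tokens.length →
    (∀ j, j < tokens.length → tags[j]? = some (idx.get? j)) →
    (ds.foldl (dtB_entry tokens tokens.length (dtB_index tokens tokens.length)) tags).length = tokens.length ∧
    ∀ j, j < tokens.length →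
      (ds.foldl (dtB_entry tokens tokens.length (dtB_index tokens tokens.length)) tags)[j]?
        = some ((ds.foldl (fun idx tup =>
            let parts := (PySem.Str.split? tup.1 " ").getD []
            dtA_inner tokens tokens.length parts.length parts tup.2 (List.range tokens.length) idx) idx).get? j) := by
  intro ds
  induction ds with
  | nil => intro idx tags hlen hinv; exact ⟨hlen, hinv⟩
  | cons tup rest ih =>
      intro idx tags hlen hinv
      simp only [List.foldl_cons]
      obtain ⟨h1, h2⟩ := entry_step tokens tup idx tags hlen hinv
      exact ih _ _ h1 h2

theorem dictionary_tagging_eq (tokens : List String) (_dict : List (String × String)) :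
    dictionary_tagging tokens _dict = dictionary_tagging_alt tokens _dict := by
  simp only [dictionary_tagging, dictionary_tagging_alt]
  obtain ⟨hlen, hinv⟩ := dict_fold tokens _dict PySem.Dict.empty
    (List.replicate tokens.length none) (by simp)
    (by intro j hj; simp [PySem.Dict.get?_empty, hj])
  apply List.ext_getElem?
  intro j
  by_cases hj : j < tokens.length
  · have hj2 : j < (_dict.foldl (dtB_entry tokens tokens.length (dtB_index tokens tokens.length))
        (List.replicate tokens.length none)).length := by omega
    have htagj : (_dict.foldl (dtB_entry tokens tokens.length (dtB_index tokens tokens.length))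
        (List.replicate tokens.length none))[j] = (_dict.foldl (fun idx tup =>
            let parts := (PySem.Str.split? tup.1 " ").getD []
            dtA_inner tokens tokens.length parts.length parts tup.2 (List.range tokens.length) idx)
            PySem.Dict.empty).get? j := by
      have h := hinv j hj
      rw [List.getElem?_eq_getElem hj2] at h
      exact Option.some.inj h
    rw [List.getElem?_eq_getElem (l := List.zip _ _) (by rw [List.length_zip]; omega),
        List.getElem_zip, htagj, List.getElem?_map, List.getElem?_range hj]
    simp only [Option.map_some]
    congr 2
    · rw [PySem.List.pyGetD_natCast, List.getD_eq_getElem?_getD,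
          List.getElem?_eq_getElem hj]
      rfl
    · rw [PySem.Dict.contains_eq_isSome_get?]
      cases PySem.Dict.get? _ j
      · simp
      · simp

  · rw [List.getElem?_eq_none (by simp; omega),
        List.getElem?_eq_none (by rw [List.length_zip]; omega)]
-- ===== VERDICT (by name: the statement is the Claim_ definition above) =====
theorem dictionary_tagging_spec : Claim_equal_dictionary_tagging := by
  intro tokens _dict _
  exact dictionary_tagging_eq tokens _dict
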